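-- pv_equiv track=rewrite | github.com/JeanPhilipLalumiere/MCGT | tools/repair_common_cli.py | bracket_depth_upto
-- ===== SOURCE A (Python) =====
-- def bracket_depth_upto(text: str) -> int:
--     depth = 0; in_str = None; esc = False
--     for ch in text:
--         if in_str:
--             if esc: esc = False
--             elif ch == "\\": esc = True
--             elif ch == in_str: in_str = None
--             continue
--         if ch in ("'", '"'): in_str = ch
--         elif ch in "([{": depth += 1
--         elif ch in ")]}": depth = max(0, depth-1)
--     return depth
-- ===== SOURCE B (Python) =====
-- def bracket_depth_upto(text: str) -> int:
--     # Pass 1: strip string literals (backslash escapes the next char; an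
--     # unterminated string swallows the rest of the text).
--     stripped = []
--     i = 0
--     n = len(text)
--     while i < n:
--         ch = text[i]
--         if ch == "'" or ch == '"':
--             i += 1
--             while i < n:
--                 c = text[i]
--                 if c == "\\":
--                     i += 2
--                 elif c == ch:
--                     i += 1
--                     break
--                 else:
--                     i += 1
--         else:
--             stripped.append(ch)
--             i += 1
--     # Pass 2: count net depth, clamped at 0.
--     depth = 0
--     for c in stripped:
--         if c in "([{":
--             depth += 1
--         elif c in ")]}":
--             depth = max(0, depth - 1)
--     return depth
-- ===== Notes on version B (the rewrite author's own statement) =====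
-- stated objective: alternative
-- what changed: Replaces A's single fused state machine (in_str/esc flags carried through one loop) by a two-pass decomposition: first strip all string literals with a dedicated skip scanner, then count clamped bracket depth over the stripped text.
import Mathlib
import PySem

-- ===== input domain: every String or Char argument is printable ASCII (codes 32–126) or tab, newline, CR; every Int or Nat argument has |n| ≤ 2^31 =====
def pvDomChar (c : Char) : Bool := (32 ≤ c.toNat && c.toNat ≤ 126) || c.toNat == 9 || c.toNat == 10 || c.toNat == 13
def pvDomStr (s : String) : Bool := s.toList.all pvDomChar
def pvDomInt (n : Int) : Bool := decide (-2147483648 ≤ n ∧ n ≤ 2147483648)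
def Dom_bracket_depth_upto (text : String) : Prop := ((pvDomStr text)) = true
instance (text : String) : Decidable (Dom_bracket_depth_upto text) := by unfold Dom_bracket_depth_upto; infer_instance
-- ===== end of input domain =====

-- B replaces A's fused escape/bracket state machine by a strip-string-literals
-- pass followed by a clamped depth count (alternative decomposition, same cost).

-- ===== PORT A =====
-- A's for-loop as structural recursion over the characters, carrying the same
-- state (depth, in_str, esc); branches in A's order.
def bracketRunA : List Char → Int → Option Char → Bool → Int
  | [], depth, _, _ => depth
  | ch :: rest, depth, some q, esc =>
      if esc then bracketRunA rest depth (some q) false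
      else if ch = '\\' then bracketRunA rest depth (some q) true
      else if ch = q then bracketRunA rest depth none false
      else bracketRunA rest depth (some q) false
  | ch :: rest, depth, none, _ =>
      if ch = '\'' ∨ ch = '"' then bracketRunA rest depth (some ch) false
      else if ch = '(' ∨ ch = '[' ∨ ch = '{' then bracketRunA rest (depth + 1) none false
      else if ch = ')' ∨ ch = ']' ∨ ch = '}' then bracketRunA rest (max 0 (depth - 1)) none false
      else bracketRunA rest depth none false

def bracket_depth_upto (text : String) : Int :=
  bracketRunA text.toList 0 none false

-- ===== PORT B =====
-- Source B's inner while-loop: skip a string literal opened by quote q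
-- (backslash consumes the next char; unterminated literal eats everything).
def bracketSkipStr (q : Char) : List Char → List Char
  | [] => []
  | c :: rest =>
      if c = '\\' then bracketSkipStr q (rest.drop 1)
      else if c = q then rest
      else bracketSkipStr q rest
termination_by l => l.length
decreasing_by
  · simp only [List.length_cons, List.length_drop]; omega
  · simp

-- (termination helper for the outer loop, cited by its decreasing_by)
theorem bracketSkipStr_length_le (q : Char) (l : List Char) :
    (bracketSkipStr q l).length ≤ l.length := by
  induction l using bracketSkipStr.induct q with
  | case1 => simp [bracketSkipStr]
  | case2 rest ih =>
      rw [bracketSkipStr, if_pos rfl]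
      calc (bracketSkipStr q (rest.drop 1)).length ≤ (rest.drop 1).length := ih
        _ ≤ ('\\' :: rest).length := by simp; omega
  | case3 rest hbs => rw [bracketSkipStr, if_neg hbs, if_pos rfl]; simp
  | case4 c rest hbs hq ih =>
      rw [bracketSkipStr, if_neg hbs, if_neg hq]
      exact Nat.le_succ_of_le ih

-- Source B's outer while-loop: the text with string literals removed.
def bracketStrip : List Char → List Char
  | [] => []
  | ch :: rest =>
      if ch = '\'' ∨ ch = '"' then bracketStrip (bracketSkipStr ch rest)
      else ch :: bracketStrip rest
termination_by l => l.length
decreasing_by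
  · simp only [List.length_cons]
    exact Nat.lt_succ_of_le (bracketSkipStr_length_le ch rest)
  · simp

-- Source B's counting for-loop.
def bracketCount : List Char → Int → Int
  | [], depth => depth
  | c :: rest, depth =>
      if c = '(' ∨ c = '[' ∨ c = '{' then bracketCount rest (depth + 1)
      else if c = ')' ∨ c = ']' ∨ c = '}' then bracketCount rest (max 0 (depth - 1))
      else bracketCount rest depth

def bracket_depth_upto_alt (text : String) : Int :=
  bracketCount (bracketStrip text.toList) 0

-- ===== PRECONDITION & SPEC =====
def Spec_bracket_depth_upto (text : String) (out : Int) : Prop := out = bracket_depth_upto_alt text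
instance (text : String) (out : Int) : Decidable (Spec_bracket_depth_upto text out) := by unfold Spec_bracket_depth_upto; infer_instance

-- ===== CLAIM (what is proved, stated in full; the proofs are below) =====
def Claim_equal_bracket_depth_upto : Prop := ∀ (text : String), Dom_bracket_depth_upto text → Spec_bracket_depth_upto text (bracket_depth_upto text)

-- ===== LEMMAS AND PROOFS =====

-- Inside a string literal, A's machine reaches exactly the suffix B's skipper returns.
theorem bracketRunA_skip (q : Char) (l : List Char) (d : Int) :
    bracketRunA l d (some q) false = bracketRunA (bracketSkipStr q l) d none false := by
  induction l using bracketSkipStr.induct q with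
  | case1 => simp [bracketRunA, bracketSkipStr]
  | case2 rest ih =>
      rw [bracketRunA, if_neg (by simp), if_pos rfl, bracketSkipStr, if_pos rfl]
      cases rest with
      | nil => simpa [bracketRunA] using ih
      | cons c' rest' => simpa [bracketRunA] using ih
  | case3 rest hbs =>
      rw [bracketRunA, if_neg (by simp), if_neg hbs, if_pos rfl,
          bracketSkipStr, if_neg hbs, if_pos rfl]
  | case4 c rest hbs hq ih =>
      rw [bracketRunA, if_neg (by simp), if_neg hbs, if_neg hq,
          bracketSkipStr, if_neg hbs, if_neg hq]
      exact ih

-- Outside string literals, A's machine computes B's count of the stripped text.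
theorem bracketRunA_eq_count (l : List Char) (d : Int) :
    bracketRunA l d none false = bracketCount (bracketStrip l) d := by
  induction l using bracketStrip.induct generalizing d with
  | case1 => simp [bracketRunA, bracketStrip, bracketCount]
  | case2 ch rest hq ih =>
      rw [bracketRunA, if_pos hq, bracketStrip, if_pos hq, bracketRunA_skip]
      exact ih d
  | case3 ch rest hq ih =>
      rw [bracketRunA, if_neg hq, bracketStrip, if_neg hq, bracketCount]
      split_ifs with h1 h2
      · exact ih _
      · exact ih _
      · exact ih _

-- ===== VERDICT (by name: the statement is the Claim_ definition above) =====
theorem bracket_depth_upto_spec : Claim_equal_bracket_depth_upto := by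
  intro text _
  unfold Spec_bracket_depth_upto bracket_depth_upto bracket_depth_upto_alt
  exact bracketRunA_eq_count _ 0
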